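-- pv_equiv track=rewrite | github.com/AntoineZak7/GMCHIISTATS | test_matching.py | do_list
-- ===== SOURCE A (Python) =====
-- def extract_ind(list1,  value):
--     ind_val = [[idx,item] for [idx, item] in enumerate(list1) if item == value]
--     indexes = [item[0] for item in ind_val]
--     return indexes
--
-- def extract_values(list1, indexes):
--     values = [list1[i] for i in indexes]
--     return values
--
-- def do_list(list1, gmc, key):
--     done_list = []
--     for hii in list1:
--         sublist = hii[key]
--         sublist_ind = hii["GMCS"]
--         indexes = extract_ind(sublist_ind, gmc)
--         value_list = extract_values(sublist, indexes)
--         done_list.append(value_list)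
--     return done_list
-- ===== SOURCE B (Python) =====
-- def do_list(list1, gmc, key):
--     return [[v for t, v in zip(hii["GMCS"], hii[key]) if t == gmc]
--             for hii in list1]
-- ===== Notes on version B (the rewrite author's own statement) =====
-- stated objective: idiomatic
-- what changed: B pairs the tag list and the value list with zip and keeps values whose tag equals gmc in one comprehension, eliminating A's index machinery entirely (no enumerate, no intermediate index list, no random-access gather).
import Mathlib
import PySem

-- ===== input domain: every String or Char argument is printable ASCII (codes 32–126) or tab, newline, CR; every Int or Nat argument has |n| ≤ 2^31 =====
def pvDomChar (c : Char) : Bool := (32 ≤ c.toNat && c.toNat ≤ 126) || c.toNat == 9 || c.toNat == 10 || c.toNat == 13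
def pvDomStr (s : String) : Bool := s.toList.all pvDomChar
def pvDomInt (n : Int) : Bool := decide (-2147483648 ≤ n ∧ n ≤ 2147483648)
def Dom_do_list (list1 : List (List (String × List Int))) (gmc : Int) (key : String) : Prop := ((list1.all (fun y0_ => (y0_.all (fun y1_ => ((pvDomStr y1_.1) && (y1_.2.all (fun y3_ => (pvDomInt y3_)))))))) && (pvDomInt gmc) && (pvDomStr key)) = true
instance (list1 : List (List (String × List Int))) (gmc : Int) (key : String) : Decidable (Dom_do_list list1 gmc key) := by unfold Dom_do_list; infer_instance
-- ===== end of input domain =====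

-- B replaces A's index machinery (enumerate → index list → random-access gather) by a
-- zip of the tag and value lists filtered on the tag; objective: idiomatic.

-- dict lookup hii[k] on the association list: first matching pair (Pre_ excludes missing keys)
def pyLookup (hii : List (String × List Int)) (k : String) : List Int :=
  ((hii.find? (fun p => p.1 == k)).map (fun p => p.2)).getD []

-- ===== PORT A =====
def extract_ind (list1 : List Int) (value : Int) : List Int :=
  -- ind_val: enumerate + filter (the 2-element lists [idx,item] are kept as pairs)
  let ind_val := (PySem.List.enumerate list1).filter (fun p => p.2 == value)
  ind_val.map (fun p => p.1)

def extract_values (list1 : List Int) (indexes : List Int) : List Int :=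
  indexes.map (fun i => (PySem.List.pyGet? list1 i).getD 0)  -- none (IndexError) excluded by Pre_

def do_list (list1 : List (List (String × List Int))) (gmc : Int) (key : String) : List (List Int) :=
  list1.foldl (fun done_list hii =>
    let sublist := pyLookup hii key
    let sublist_ind := pyLookup hii "GMCS"
    let indexes := extract_ind sublist_ind gmc
    let value_list := extract_values sublist indexes
    done_list ++ [value_list]) []

-- ===== PORT B =====
def do_list_alt (list1 : List (List (String × List Int))) (gmc : Int) (key : String) : List (List Int) :=
  list1.map (fun hii =>
    (((pyLookup hii "GMCS").zip (pyLookup hii key)).filter (fun p => p.1 == gmc)).map (fun p => p.2))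

-- ===== PRECONDITION & SPEC =====
-- Pre_ excludes exactly the inputs on which A raises: an item missing the key `key`
-- or the key "GMCS" (KeyError), or a matching GMCS position beyond the end of the
-- value list (IndexError).
def Pre_do_list (list1 : List (List (String × List Int))) (gmc : Int) (key : String) : Prop :=
  ∀ hii ∈ list1,
    (hii.find? (fun p => p.1 == key)).isSome = true ∧
    (hii.find? (fun p => p.1 == "GMCS")).isSome = true ∧
    ∀ k ∈ List.range (pyLookup hii "GMCS").length,
      (pyLookup hii "GMCS").getD k 0 = gmc → k < (pyLookup hii key).length
instance (list1 : List (List (String × List Int))) (gmc : Int) (key : String) : Decidable (Pre_do_list list1 gmc key) := by unfold Pre_do_list; infer_instance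

def pvWitness_do_list : (List (List (String × List Int))) × Int × String :=
  ([[("GMCS", [1, 2]), ("k", [10, 20])]], 1, "k")

def Spec_do_list (list1 : List (List (String × List Int))) (gmc : Int) (key : String) (out : List (List Int)) : Prop := out = do_list_alt list1 gmc key
instance (list1 : List (List (String × List Int))) (gmc : Int) (key : String) (out : List (List Int)) : Decidable (Spec_do_list list1 gmc key out) := by unfold Spec_do_list; infer_instance

-- ===== CLAIM (what is proved, stated in full; the proofs are below) =====
def Claim_equal_do_list : Prop := ∀ (list1 : List (List (String × List Int))) (gmc : Int) (key : String), Dom_do_list list1 gmc key → Pre_do_list list1 gmc key → Spec_do_list list1 gmc key (do_list list1 gmc key)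

-- ===== LEMMAS AND PROOFS =====

-- A's enumerate→filter→gather pipeline equals B's zip→filter→map, generalized over the
-- enumerate start n, provided every matching position is within the value list.
theorem aux_zip (gmc : Int) (tags : List Int) : ∀ (n : Nat) (vals : List Int),
    (∀ (k : Nat) (hk : k < tags.length), tags[k] = gmc → n + k < vals.length) →
    ((PySem.List.enumerate tags (n : Int)).filter (fun p => p.2 == gmc)).map
        (fun p => (PySem.List.pyGet? vals p.1).getD 0)
      = ((tags.zip (vals.drop n)).filter (fun p => p.1 == gmc)).map (fun p => p.2) := by
  induction tags with
  | nil => intro n vals _; simp [PySem.List.enumerate_nil]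
  | cons t ts ih =>
    intro n vals h
    rw [PySem.List.enumerate_cons]
    have hstep : ((n : Int) + 1) = ((n + 1 : Nat) : Int) := by push_cast; ring
    by_cases ht : t = gmc
    · have hn : n < vals.length := by
        have := h 0 (by simp) (by simpa using ht); omega
      have hdrop : vals.drop n = vals[n] :: vals.drop (n + 1) :=
        List.drop_eq_getElem_cons hn
      have hrec := ih (n + 1) vals (fun k hk hkv => by
        have := h (k + 1) (by simpa using hk) (by simpa using hkv); omega)
      simp only [List.filter_cons, ht, beq_self_eq_true, if_true, List.map_cons, hdrop,
        List.zip_cons_cons, hstep, hrec]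
      simp [hn]
    · have hrec := ih (n + 1) vals (fun k hk hkv => by
        have := h (k + 1) (by simpa using hk) (by simpa using hkv); omega)
      by_cases hlen : n < vals.length
      · have hdrop : vals.drop n = vals[n] :: vals.drop (n + 1) :=
          List.drop_eq_getElem_cons hlen
        simp only [List.filter_cons, hdrop, List.zip_cons_cons]
        simp only [show (t == gmc) = false by simp [ht], if_false, Bool.false_eq_true]
        rw [hstep, hrec]
      · -- value list exhausted: no later position may match, both sides are empty
        have hdrop : vals.drop n = [] := by
          simp [List.drop_eq_nil_iff]; omega
        have hnomatch : ∀ (k : Nat) (hk : k < ts.length), ts[k] ≠ gmc := by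
          intro k hk hkv
          have := h (k + 1) (by simpa using hk) (by simpa using hkv); omega
        have hfilter : ((PySem.List.enumerate ts ((n : Int) + 1)).filter
            (fun p => p.2 == gmc)) = [] := by
          rw [List.filter_eq_nil_iff]
          intro p hp
          rw [PySem.List.mem_enumerate_iff] at hp
          obtain ⟨k, hk, rfl⟩ := hp
          simpa using hnomatch k hk
        simp [hdrop, ht, hfilter]

-- per-item bridge: A's two helpers equal B's zip expression under the in-range condition
theorem per_item (tags vals : List Int) (gmc : Int)
    (h : ∀ k ∈ List.range tags.length, tags.getD k 0 = gmc → k < vals.length) :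
    extract_values vals (extract_ind tags gmc)
      = ((tags.zip vals).filter (fun p => p.1 == gmc)).map (fun p => p.2) := by
  have h' : ∀ (k : Nat) (hk : k < tags.length), tags[k] = gmc → 0 + k < vals.length := by
    intro k hk hkv
    have := h k (by simpa using hk) (by rw [List.getD_eq_getElem _ _ hk]; exact hkv)
    omega
  have := aux_zip gmc tags 0 vals h'
  simp only [Nat.cast_zero, List.drop_zero] at this
  simpa [extract_values, extract_ind, List.map_map, Function.comp] using this

-- ===== VERDICT (by name: the statements are the Claim_ definitions above) =====
theorem do_list_spec : Claim_equal_do_list := by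
  intro list1 gmc key _ hpre
  unfold Spec_do_list do_list do_list_alt
  rw [PySem.List.foldl_append_singleton_eq_map, List.nil_append]
  apply List.map_congr_left
  intro hii hmem
  exact per_item _ _ _ (hpre hii hmem).2.2
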